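-- pv_equiv track=rewrite | github.com/NameTheVariable/Algorythm | Programmers/LV.1/숫자야구.py | solution
-- ===== SOURCE A (Python) =====
-- def solution(n):
--     answer = 0
--     fibo = 0
--     if(n == 1):
--         fibo = 0
--     else:
--         for i in range(n):
--             fibo = i-1 + i
--     # answer = fibo % 1234567
--     return fibo
-- ===== SOURCE B (Python) =====
-- def solution(n):
--     # closed form: the loop only keeps its last iteration's value
--     return 0 if n <= 1 else 2 * n - 3
-- ===== Notes on version B (the rewrite author's own statement) =====
-- stated objective: simpler
-- what changed: Replaced the loop (which overwrites fibo each iteration, leaving only the last value) with its closed form: 0 for n <= 1, else 2*n-3.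
import Mathlib
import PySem

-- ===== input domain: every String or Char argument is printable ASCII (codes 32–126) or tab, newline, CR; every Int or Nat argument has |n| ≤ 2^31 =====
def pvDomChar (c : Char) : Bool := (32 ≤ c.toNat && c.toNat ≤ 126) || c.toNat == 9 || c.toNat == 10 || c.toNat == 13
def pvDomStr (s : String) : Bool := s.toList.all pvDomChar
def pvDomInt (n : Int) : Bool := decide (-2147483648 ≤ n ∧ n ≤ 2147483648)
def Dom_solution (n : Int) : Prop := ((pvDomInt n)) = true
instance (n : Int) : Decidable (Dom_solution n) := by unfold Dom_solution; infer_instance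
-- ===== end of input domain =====

-- B replaces A's loop by the closed form it computes (0 for n ≤ 1, else 2n-3); simpler and O(1).

-- ===== PORT A =====
def solution (n : Int) : Int :=
  let fibo : Int := 0
  if n == 1 then
    0
  else
    (PySem.List.pyRange 0 n 1).foldl (fun _ i => i - 1 + i) fibo

-- ===== PORT B =====
def solution_alt (n : Int) : Int :=
  if n ≤ 1 then 0 else 2 * n - 3

-- ===== PRECONDITION & SPEC =====
def Spec_solution (n : Int) (out : Int) : Prop := out = solution_alt n
instance (n : Int) (out : Int) : Decidable (Spec_solution n out) := by unfold Spec_solution; infer_instance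

-- ===== CLAIM (what is proved, stated in full; the proofs are below) =====
def Claim_equal_solution : Prop := ∀ (n : Int), Dom_solution n → Spec_solution n (solution n)

-- ===== LEMMAS AND PROOFS =====

-- A fold with a state-forgetting body returns its last element's value (or the init on []).
theorem foldl_forget {α : Type} (g : Int → α) (a : α) (l : List Int) (x : Int) :
    (l ++ [x]).foldl (fun _ i => g i) a = g x := by
  induction l generalizing a with
  | nil => simp
  | cons h t ih => simp only [List.cons_append, List.foldl_cons]; exact ih _

theorem solution_eq (n : Int) (h : 2 ≤ n) : solution n = 2 * n - 3 := by
  unfold solution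
  have hne : (n == 1) = false := by
    simp at *; omega
  simp only [hne]
  have hsplit : PySem.List.pyRange 0 n 1 =
      PySem.List.pyRange 0 (n - 1) 1 ++ [n - 1] := by
    have := PySem.List.pyRange_one_succ_right (a := 0) (b := n - 1) (by omega)
    simpa [sub_add_cancel] using this
  rw [hsplit, foldl_forget (g := fun i => i - 1 + i)]
  simp
  ring

-- ===== VERDICT (by name: the statement is the Claim_ definition above) =====
theorem solution_spec : Claim_equal_solution := by
  intro n _
  unfold Spec_solution solution_alt
  by_cases h : n ≤ 1
  · rcases lt_or_eq_of_le h with hlt | heq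
    · unfold solution
      rcases eq_or_ne n 1 with h1 | h1
      · simp [h1]
      · have : PySem.List.pyRange 0 n 1 = [] :=
          PySem.List.pyRange_one_eq_nil (by omega)
        simp only [this, List.foldl_nil]
        split_ifs <;> omega
    · simp [solution, heq.symm]
  · rw [solution_eq n (by omega)]
    simp [h]
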